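-- pv_equiv track=rewrite | github.com/pknot212121/antiyoy-clone | Antiyoy/bot/game_utils.py | get_hex_neighbors
-- ===== SOURCE A (Python) =====
-- from typing import List, Optional, Tuple, Set
--
-- def get_hex_neighbors(x: int, y: int, width: int, height: int) -> List[Tuple[int, int]]:
--     """
--     Get valid neighbor coordinates for a hex.
--     Hexagonal grid uses offset coordinates (odd-q / column-based).
--     Must match C++ board.cpp evenDirections/oddDirections.
--     """
--     neighbors = []
--
--     # Different offsets based on COLUMN (x), not row - must match C++!
--     if x % 2 == 0:  # Even column
--         offsets = [
--             ( 0, -1),  # top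
--             (-1, -1),  # left-top
--             (-1,  0),  # left-bottom
--             ( 0,  1),  # bottom
--             ( 1,  0),  # right-bottom
--             ( 1, -1),  # right-top
--         ]
--     else:  # Odd column
--         offsets = [
--             ( 0, -1),  # top
--             (-1,  0),  # left-top
--             (-1,  1),  # left-bottom
--             ( 0,  1),  # bottom
--             ( 1,  1),  # right-bottom
--             ( 1,  0),  # right-top
--         ]
--
--     for dx, dy in offsets:
--         nx, ny = x + dx, y + dy
--         if 0 <= nx < width and 0 <= ny < height:
--             neighbors.append((nx, ny))
--
--     return neighbors
-- ===== SOURCE B (Python) =====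
-- def get_hex_neighbors(x: int, y: int, width: int, height: int):
--     """Same neighbors via odd-q offset -> axial coordinates: the six fixed
--     axial direction vectors replace the even/odd-column branch."""
--     q, r = x, y - (x - x % 2) // 2
--     neighbors = []
--     for dq, dr in [(0, -1), (-1, 0), (-1, 1), (0, 1), (1, 0), (1, -1)]:
--         nq, nr = q + dq, r + dr
--         nx, ny = nq, nr + (nq - nq % 2) // 2
--         if 0 <= nx < width and 0 <= ny < height:
--             neighbors.append((nx, ny))
--     return neighbors
-- ===== Notes on version B (the rewrite author's own statement) =====
-- stated objective: idiomatic
-- what changed: B converts the odd-q offset coordinate to axial coordinates, adds each of the six fixed axial direction vectors, and converts back, eliminating A's even/odd-column branch and its two hard-coded offset tables.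
import Mathlib
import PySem

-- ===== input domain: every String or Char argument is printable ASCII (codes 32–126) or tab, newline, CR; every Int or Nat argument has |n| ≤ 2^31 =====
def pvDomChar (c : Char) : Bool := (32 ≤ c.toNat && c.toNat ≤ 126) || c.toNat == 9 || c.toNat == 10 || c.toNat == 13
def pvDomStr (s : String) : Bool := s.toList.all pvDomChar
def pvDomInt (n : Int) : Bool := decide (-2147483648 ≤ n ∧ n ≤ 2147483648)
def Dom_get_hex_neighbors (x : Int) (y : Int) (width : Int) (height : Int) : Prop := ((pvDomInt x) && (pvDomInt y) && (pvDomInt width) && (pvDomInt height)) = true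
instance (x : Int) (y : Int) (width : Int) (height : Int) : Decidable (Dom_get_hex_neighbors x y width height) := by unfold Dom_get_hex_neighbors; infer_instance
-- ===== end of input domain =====

-- B replaces A's even/odd-column branch with a conversion to axial coordinates and six fixed
-- direction vectors (objective: idiomatic); same O(1) cost, return values identical.

-- ===== PORT A =====
def get_hex_neighbors (x : Int) (y : Int) (width : Int) (height : Int) : List (Int × Int) :=
  let offsets : List (Int × Int) :=
    if PySem.Int.mod x 2 = 0 then
      [(0, -1), (-1, -1), (-1, 0), (0, 1), (1, 0), (1, -1)]
    else
      [(0, -1), (-1, 0), (-1, 1), (0, 1), (1, 1), (1, 0)]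
  offsets.foldl (fun neighbors d =>
    let nx := x + d.1
    let ny := y + d.2
    if 0 ≤ nx ∧ nx < width ∧ 0 ≤ ny ∧ ny < height then neighbors ++ [(nx, ny)] else neighbors) []

-- ===== PORT B =====
def get_hex_neighbors_alt (x : Int) (y : Int) (width : Int) (height : Int) : List (Int × Int) :=
  let q : Int := x
  let r : Int := y - PySem.Int.floordiv (x - PySem.Int.mod x 2) 2
  ([((0 : Int), (-1 : Int)), (-1, 0), (-1, 1), (0, 1), (1, 0), (1, -1)]).foldl
    (fun neighbors d =>
      let nq := q + d.1
      let nr := r + d.2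
      let nx := nq
      let ny := nr + PySem.Int.floordiv (nq - PySem.Int.mod nq 2) 2
      if 0 ≤ nx ∧ nx < width ∧ 0 ≤ ny ∧ ny < height then neighbors ++ [(nx, ny)] else neighbors) []

-- ===== PRECONDITION & SPEC =====
def Spec_get_hex_neighbors (x : Int) (y : Int) (width : Int) (height : Int) (out : List (Int × Int)) : Prop := out = get_hex_neighbors_alt x y width height
instance (x : Int) (y : Int) (width : Int) (height : Int) (out : List (Int × Int)) : Decidable (Spec_get_hex_neighbors x y width height out) := by unfold Spec_get_hex_neighbors; infer_instance

-- ===== CLAIM (what is proved, stated in full; the proofs are below) =====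
def Claim_equal_get_hex_neighbors : Prop := ∀ (x : Int) (y : Int) (width : Int) (height : Int), Dom_get_hex_neighbors x y width height → Spec_get_hex_neighbors x y width height (get_hex_neighbors x y width height)

-- ===== LEMMAS AND PROOFS =====

-- common bounds-filtering step both folds use (proof-only helper)
def pvStep (width height : Int) (acc : List (Int × Int)) (p : Int × Int) : List (Int × Int) :=
  if 0 ≤ p.1 ∧ p.1 < width ∧ 0 ≤ p.2 ∧ p.2 < height then acc ++ [p] else acc

lemma A_as_step (x y width height : Int) :
    get_hex_neighbors x y width height =
      List.foldl (pvStep width height) []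
        (((if PySem.Int.mod x 2 = 0 then
            [((0:Int), (-1:Int)), (-1, -1), (-1, 0), (0, 1), (1, 0), (1, -1)]
          else
            [((0:Int), (-1:Int)), (-1, 0), (-1, 1), (0, 1), (1, 1), (1, 0)])).map
          (fun d => (x + d.1, y + d.2))) := by
  rw [List.foldl_map]; rfl

lemma B_as_step (x y width height : Int) :
    get_hex_neighbors_alt x y width height =
      List.foldl (pvStep width height) []
        (([((0:Int), (-1:Int)), (-1, 0), (-1, 1), (0, 1), (1, 0), (1, -1)]).map
          (fun d =>
            (x + d.1,
             y - PySem.Int.floordiv (x - PySem.Int.mod x 2) 2 + d.2 +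
               PySem.Int.floordiv (x + d.1 - PySem.Int.mod (x + d.1) 2) 2))) := by
  rw [List.foldl_map]; rfl

-- ===== VERDICT (by name: the statement is the Claim_ definition above) =====
theorem get_hex_neighbors_spec : Claim_equal_get_hex_neighbors := by
  intro x y width height _
  unfold Spec_get_hex_neighbors
  rw [A_as_step, B_as_step]
  by_cases hp : PySem.Int.mod x 2 = 0
  · rw [if_pos hp]
    rw [PySem.Int.mod_eq_emod_of_pos (by norm_num : (0:Int) < 2)] at hp
    congr 1
    simp only [List.map_cons, List.map_nil, List.cons.injEq, Prod.mk.injEq, and_true, true_and,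
      PySem.Int.mod_eq_emod_of_pos (by norm_num : (0:Int) < 2),
      PySem.Int.floordiv_eq_ediv_of_pos (by norm_num : (0:Int) < 2)]
    omega
  · rw [if_neg hp]
    rw [PySem.Int.mod_eq_emod_of_pos (by norm_num : (0:Int) < 2)] at hp
    congr 1
    simp only [List.map_cons, List.map_nil, List.cons.injEq, Prod.mk.injEq, and_true, true_and,
      PySem.Int.mod_eq_emod_of_pos (by norm_num : (0:Int) < 2),
      PySem.Int.floordiv_eq_ediv_of_pos (by norm_num : (0:Int) < 2)]
    omega
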